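-- pv_equiv track=rewrite | github.com/flavius-popan/charlie | frontend/utils.py | _extract_preview_from_content
-- ===== SOURCE A (Python) =====
-- def _extract_preview_from_content(content: str, max_chars: int) -> str:
--     """Extract preview from content - markdown title or first line."""
--     lines = content.strip().split("\n")
--
--     # Look for markdown title
--     for line in lines:
--         stripped = line.strip()
--         if stripped.startswith("# "):
--             title = stripped[2:].strip()
--             if title:
--                 if len(title) <= max_chars:
--                     return title
--                 return title[:max_chars].rstrip(".!? ") + "..."
--
--     # No title found - use first non-empty line
--     for line in lines:
--         stripped = line.strip()
--         if stripped:
--             if len(stripped) <= max_chars: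
--                 return stripped
--             return stripped[:max_chars].rstrip(".!? ") + "..."
--
--     return "Untitled"
-- ===== SOURCE B (Python) =====
-- def _truncate(s, max_chars):
--     if len(s) <= max_chars:
--         return s
--     return s[:max_chars].rstrip(".!? ") + "..."
--
--
-- def _extract_preview_from_content(content: str, max_chars: int) -> str:
--     """Single pass: remember first markdown title and first non-empty line."""
--     title = None
--     first = None
--     for line in content.strip().split("\n"):
--         stripped = line.strip()
--         if title is None and stripped.startswith("# "):
--             t = stripped[2:].strip()
--             if t:
--                 title = t
--         if first is None and stripped:
--             first = stripped
--     chosen = title if title is not None else first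
--     return "Untitled" if chosen is None else _truncate(chosen, max_chars)
-- ===== Notes on version B (the rewrite author's own statement) =====
-- stated objective: simpler
-- what changed: Replaces A's two sequential scans over the lines (one for a markdown title, one for the first non-empty line) with a single pass that records the first title and first non-empty line once each, followed by a shared truncation helper instead of two inlined copies of the truncation logic.
import Mathlib
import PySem

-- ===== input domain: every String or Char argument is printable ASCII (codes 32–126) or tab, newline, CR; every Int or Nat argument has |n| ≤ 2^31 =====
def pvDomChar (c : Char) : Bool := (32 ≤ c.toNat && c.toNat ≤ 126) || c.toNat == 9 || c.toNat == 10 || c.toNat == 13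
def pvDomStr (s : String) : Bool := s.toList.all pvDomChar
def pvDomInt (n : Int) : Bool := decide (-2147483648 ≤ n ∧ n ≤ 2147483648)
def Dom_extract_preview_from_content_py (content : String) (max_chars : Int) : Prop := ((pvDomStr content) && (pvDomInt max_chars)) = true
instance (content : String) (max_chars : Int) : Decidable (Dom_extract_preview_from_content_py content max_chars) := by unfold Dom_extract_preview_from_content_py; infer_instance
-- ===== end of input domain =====

-- B replaces A's two sequential scans of the lines with one pass keeping the first title
-- and first non-empty line, then a shared truncation helper; objective: simpler.

-- shared hand-ported primitive: s.rstrip(".!? ") — PySem has no rstrip-with-chars;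
-- exact: drops exactly the trailing characters among '.', '!', '?', ' '.
def pvRstripPunct (s : String) : String :=
  String.ofList (s.toList.rdropWhile (fun c => c == '.' || c == '!' || c == '?' || c == ' '))

-- ===== PORT A =====
-- first loop of A: look for a markdown title, returning A's (inline-truncated) result
def extractA_loop1 : List String → Int → Option String
  | [], _ => none
  | line :: rest, mc =>
    let stripped := PySem.Str.strip line
    if PySem.Str.startswith stripped "# " then
      let title := PySem.Str.strip (PySem.Str.slice stripped (some 2) none)
      if title ≠ "" then
        some (if (PySem.Str.len title : Int) ≤ mc then title
              else pvRstripPunct (PySem.Str.slice title none (some mc)) ++ "...")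
      else extractA_loop1 rest mc
    else extractA_loop1 rest mc

-- second loop of A: first non-empty stripped line, inline-truncated
def extractA_loop2 : List String → Int → Option String
  | [], _ => none
  | line :: rest, mc =>
    let stripped := PySem.Str.strip line
    if stripped ≠ "" then
      some (if (PySem.Str.len stripped : Int) ≤ mc then stripped
            else pvRstripPunct (PySem.Str.slice stripped none (some mc)) ++ "...")
    else extractA_loop2 rest mc

def extract_preview_from_content_py (content : String) (max_chars : Int) : String :=
  let lines := (PySem.Str.split? (PySem.Str.strip content) "\n").getD []
  match extractA_loop1 lines max_chars with
  | some r => r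
  | none =>
    match extractA_loop2 lines max_chars with
    | some r => r
    | none => "Untitled"

-- ===== PORT B =====
-- Source B's _truncate
def pvTruncate (s : String) (max_chars : Int) : String :=
  if (PySem.Str.len s : Int) ≤ max_chars then s
  else pvRstripPunct (PySem.Str.slice s none (some max_chars)) ++ "..."

-- Source B's single loop: state = (title, first), each set at most once
def extractB_scan : List String → Option String → Option String → Option String × Option String
  | [], title, first => (title, first)
  | line :: rest, title, first =>
    let stripped := PySem.Str.strip line
    let title' :=
      match title with
      | some _ => title
      | none =>
        if PySem.Str.startswith stripped "# " then
          let t := PySem.Str.strip (PySem.Str.slice stripped (some 2) none)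
          if t ≠ "" then some t else title
        else title
    let first' :=
      match first with
      | some _ => first
      | none => if stripped ≠ "" then some stripped else first
    extractB_scan rest title' first'

def extract_preview_from_content_py_alt (content : String) (max_chars : Int) : String :=
  let st := extractB_scan ((PySem.Str.split? (PySem.Str.strip content) "\n").getD []) none none
  match st.1.or st.2 with
  | none => "Untitled"
  | some s => pvTruncate s max_chars

-- ===== PRECONDITION & SPEC =====
def Spec_extract_preview_from_content_py (content : String) (max_chars : Int) (out : String) : Prop := out = extract_preview_from_content_py_alt content max_chars
instance (content : String) (max_chars : Int) (out : String) : Decidable (Spec_extract_preview_from_content_py content max_chars out) := by unfold Spec_extract_preview_from_content_py; infer_instance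

-- ===== CLAIM (what is proved, stated in full; the proofs are below) =====
def Claim_equal_extract_preview_from_content_py : Prop := ∀ (content : String) (max_chars : Int), Dom_extract_preview_from_content_py content max_chars → Spec_extract_preview_from_content_py content max_chars (extract_preview_from_content_py content max_chars)

-- ===== LEMMAS AND PROOFS =====

-- proof helpers: the raw first markdown title / first non-empty stripped line
def pvFindTitle : List String → Option String
  | [] => none
  | line :: rest =>
    let stripped := PySem.Str.strip line
    if PySem.Str.startswith stripped "# " then
      let t := PySem.Str.strip (PySem.Str.slice stripped (some 2) none)
      if t ≠ "" then some t else pvFindTitle rest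
    else pvFindTitle rest

def pvFindFirst : List String → Option String
  | [] => none
  | line :: rest =>
    let stripped := PySem.Str.strip line
    if stripped ≠ "" then some stripped else pvFindFirst rest

theorem extractB_scan_eq (lines : List String) :
    ∀ (t f : Option String),
      extractB_scan lines t f = (t.or (pvFindTitle lines), f.or (pvFindFirst lines)) := by
  induction lines with
  | nil => intro t f; simp [extractB_scan, pvFindTitle, pvFindFirst]
  | cons line rest ih =>
    intro t f
    simp only [extractB_scan, pvFindTitle, pvFindFirst]
    rw [ih]
    cases t <;> cases f <;> split_ifs <;> simp_all

theorem extractA_loop1_eq (mc : Int) (lines : List String) :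
    extractA_loop1 lines mc = (pvFindTitle lines).map (fun t => pvTruncate t mc) := by
  induction lines with
  | nil => simp [extractA_loop1, pvFindTitle]
  | cons line rest ih =>
    simp only [extractA_loop1, pvFindTitle]
    split_ifs with h1 h2 h3
    · simp only [Option.map_some, pvTruncate]; rw [if_pos h3]
    · simp only [Option.map_some, pvTruncate]; rw [if_neg h3]
    · exact ih
    · exact ih

theorem extractA_loop2_eq (mc : Int) (lines : List String) :
    extractA_loop2 lines mc = (pvFindFirst lines).map (fun t => pvTruncate t mc) := by
  induction lines with
  | nil => simp [extractA_loop2, pvFindFirst]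
  | cons line rest ih =>
    simp only [extractA_loop2, pvFindFirst]
    split_ifs with h1 h2
    · simp only [Option.map_some, pvTruncate]; rw [if_pos h2]
    · simp only [Option.map_some, pvTruncate]; rw [if_neg h2]
    · exact ih

-- ===== VERDICT (by name: the statement is the Claim_ definition above) =====
theorem extract_preview_from_content_py_spec : Claim_equal_extract_preview_from_content_py := by
  intro content max_chars _
  unfold Spec_extract_preview_from_content_py
  unfold extract_preview_from_content_py extract_preview_from_content_py_alt
  simp only [extractB_scan_eq, extractA_loop1_eq, extractA_loop2_eq, Option.none_or]
  cases pvFindTitle ((PySem.Str.split? (PySem.Str.strip content) "\n").getD []) <;>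
    cases pvFindFirst ((PySem.Str.split? (PySem.Str.strip content) "\n").getD []) <;>
    simp [Option.or]
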